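-- pv_equiv track=rewrite | github.com/ExP98/Teeworlds-DDNet-Statistics | teams_gephi/[OLD] writing_csv_to_gephi.py | deleting_slash
-- ===== SOURCE A (Python) =====
-- def deleting_slash(_nick):
--     if chr(92) in set(_nick):
--         shit_counter = 0
--         nick_str = ""
--         for c in _nick:
--             if ord(c) == 92:
--                 shit_counter = shit_counter + 1
--                 if shit_counter == 2:
--                     shit_counter = 0
--                 else:
--                     nick_str = nick_str + c
--             else:
--                 nick_str = nick_str + c
--     else:
--         nick_str = _nick
--     return nick_str
-- ===== SOURCE B (Python) =====
-- def deleting_slash(_nick):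
--     parts = _nick.split('\\')
--     res = parts[0]
--     for i, part in enumerate(parts[1:], 1):
--         res += ('\\' if i % 2 == 1 else '') + part
--     return res
-- ===== Notes on version B (the rewrite author's own statement) =====
-- stated objective: idiomatic
-- what changed: Replaces A's char-by-char scan with a backslash counter by splitting the string on '\' and rejoining the parts with an alternating separator ('\' before odd-numbered joins, nothing before even ones).
import Mathlib
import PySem

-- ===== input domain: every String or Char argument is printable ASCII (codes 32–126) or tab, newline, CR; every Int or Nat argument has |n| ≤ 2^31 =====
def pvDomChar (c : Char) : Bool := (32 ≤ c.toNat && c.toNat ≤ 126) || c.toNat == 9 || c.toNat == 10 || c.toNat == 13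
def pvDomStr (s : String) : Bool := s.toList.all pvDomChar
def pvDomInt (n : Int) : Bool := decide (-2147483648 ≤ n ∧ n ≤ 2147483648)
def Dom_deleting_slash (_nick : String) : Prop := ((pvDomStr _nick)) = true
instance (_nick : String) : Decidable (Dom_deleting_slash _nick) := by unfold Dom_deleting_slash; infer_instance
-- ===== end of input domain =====

-- B replaces A's char-by-char counter scan by a split-on-backslash / alternating rejoin (idiomatic decomposition; same cost).

-- ===== PORT A =====
-- A: if '\' occurs, scan chars with a counter that drops every second backslash.
def deleting_slash (_nick : String) : String :=
  if '\\' ∈ PySem.Set.ofList _nick.toList then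
    let r := _nick.toList.foldl
      (fun (st : Int × List Char) c =>
        if c.toNat == 92 then
          let k := st.1 + 1
          if k == 2 then (0, st.2) else (k, st.2 ++ [c])
        else (st.1, st.2 ++ [c]))
      (0, [])
    String.ofList r.2
  else _nick

-- ===== PORT B =====
-- B: split on '\', keep parts[0], then re-append each later part preceded by '\' at odd
-- join positions and nothing at even ones. str.split('\\') is ported as List.splitOn '\\'.
def deleting_slash_alt (_nick : String) : String :=
  match _nick.toList.splitOn '\\' with
  | [] => ""          -- unreachable: split always yields at least one part
  | p0 :: rest =>
    String.ofList ((PySem.List.enumerate rest 1).foldl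
      (fun acc ip => acc ++ (if PySem.Int.mod ip.1 2 == 1 then ['\\'] else []) ++ ip.2)
      p0)

-- ===== PRECONDITION & SPEC =====
def Spec_deleting_slash (_nick : String) (out : String) : Prop := out = deleting_slash_alt _nick
instance (_nick : String) (out : String) : Decidable (Spec_deleting_slash _nick out) := by unfold Spec_deleting_slash; infer_instance

-- ===== CLAIM (what is proved, stated in full; the proofs are below) =====
def Claim_equal_deleting_slash : Prop := ∀ (_nick : String), Dom_deleting_slash _nick → Spec_deleting_slash _nick (deleting_slash _nick)

-- ===== LEMMAS AND PROOFS =====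

-- Reference function: drop every second backslash; b = "the next backslash is a second one".
def pvF (b : Bool) : List Char → List Char
  | [] => []
  | c :: t =>
    if c.toNat == 92 then
      (if b then pvF false t else c :: pvF true t)
    else c :: pvF b t

-- Alternating join of the parts after parts[0]: b = "prepend a backslash before this part".
def pvJ (b : Bool) : List (List Char) → List Char
  | [] => []
  | p :: ps => (if b then ['\\'] else []) ++ p ++ pvJ (!b) ps

theorem pvChar_back (c : Char) (h : c.toNat = 92) : c = '\\' := by
  have h2 : c.val.toNat = (92 : UInt32).toNat := h
  exact Char.ext (UInt32.toNat_inj.mp h2)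

-- A's loop computes pvF.
theorem pvA_loop (l : List Char) (b : Bool) (acc : List Char) :
    (l.foldl
      (fun (st : Int × List Char) c =>
        if c.toNat == 92 then
          let k := st.1 + 1
          if k == 2 then (0, st.2) else (k, st.2 ++ [c])
        else (st.1, st.2 ++ [c]))
      ((if b then (1 : Int) else 0), acc)).2 = acc ++ pvF b l := by
  induction l generalizing b acc with
  | nil => simp [pvF]
  | cons c t ih =>
    by_cases h : c.toNat = 92
    · cases b with
      | true => simpa [pvF, h] using ih false acc
      | false =>
        have := ih true (acc ++ [c])
        simpa [pvF, h] using this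
    · cases b with
      | true => simpa [pvF, h] using ih true (acc ++ [c])
      | false => simpa [pvF, h] using ih false (acc ++ [c])

-- If the string has no backslash, pvF is the identity.
theorem pvF_no_back (l : List Char) (h : '\\' ∉ l) : pvF false l = l := by
  induction l with
  | nil => rfl
  | cons c t ih =>
    have hc : ¬ c.toNat = 92 := by
      intro hc; exact h (by simp [pvChar_back c hc])
    simp [pvF, hc, ih (fun ht => h (List.mem_cons_of_mem _ ht))]

-- The split/alternating-rejoin of l computes pvF b l.
theorem pvSplit_join (l : List Char) (b : Bool) :
    (match List.splitOnP (fun x => x == '\\') l with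
     | [] => []
     | p0 :: rest => p0 ++ pvJ (!b) rest) = pvF b l := by
  induction l generalizing b with
  | nil => cases b <;> simp [List.splitOnP_nil, pvJ, pvF]
  | cons c t ih =>
    rcases hs : List.splitOnP (fun x => x == '\\') t with _ | ⟨q0, qrest⟩
    · exact absurd hs (List.splitOnP_ne_nil _ t)
    · by_cases h : c.toNat = 92
      · have hc : c = '\\' := pvChar_back c h
        have hcb : (c == '\\') = true := by simp [hc]
        cases b with
        | false =>
          have := ih true
          rw [hs] at this
          simp only [List.splitOnP_cons, hcb, hs, pvF, h]
          simp_all [pvJ]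
        | true =>
          have := ih false
          rw [hs] at this
          simp only [List.splitOnP_cons, hcb, hs, pvF, h]
          simp_all [pvJ]
      · have hcb : (c == '\\') = false := by
          simp only [beq_eq_false_iff_ne]; intro hc; exact h (by simp [hc])
        have := ih b
        rw [hs] at this
        simp only [List.splitOnP_cons, hcb] at *
        simp_all [pvF, List.modifyHead]

-- parity of consecutive integers
theorem pvMod_flip (i : Int) :
    (PySem.Int.mod (i+1) 2 == 1) = !(PySem.Int.mod i 2 == 1) := by
  rw [PySem.Int.mod_eq_emod_of_pos (b := 2) (by omega),
      PySem.Int.mod_eq_emod_of_pos (b := 2) (by omega)]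
  rcases Int.emod_two_eq_zero_or_one i with h | h <;> simp [h] <;> omega

-- B's enumerate-fold computes pvJ.
theorem pvB_loop (rest : List (List Char)) (i : Int) (acc : List Char) :
    (PySem.List.enumerate rest i).foldl
      (fun acc ip => acc ++ (if PySem.Int.mod ip.1 2 == 1 then ['\\'] else []) ++ ip.2)
      acc = acc ++ pvJ (PySem.Int.mod i 2 == 1) rest := by
  induction rest generalizing i acc with
  | nil => simp [PySem.List.enumerate_nil, pvJ]
  | cons p ps ih =>
    rw [PySem.List.enumerate_cons, List.foldl_cons, ih (i+1), pvMod_flip]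
    cases h : (PySem.Int.mod i 2 == 1) <;> simp [pvJ, List.append_assoc]

-- ===== VERDICT (by name: the statement is the Claim_ definition above) =====
theorem deleting_slash_spec : Claim_equal_deleting_slash := by
  intro s _
  show deleting_slash s = deleting_slash_alt s
  have hB : deleting_slash_alt s = String.ofList (pvF false s.toList) := by
    unfold deleting_slash_alt
    rcases hs : s.toList.splitOn '\\' with _ | ⟨p0, rest⟩
    · exact absurd hs (List.splitOnP_ne_nil _ s.toList)
    · show String.ofList ((PySem.List.enumerate rest 1).foldl
          (fun acc ip => acc ++ (if PySem.Int.mod ip.1 2 == 1 then ['\\'] else []) ++ ip.2)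
          p0) = String.ofList (pvF false s.toList)
      have hj := pvSplit_join s.toList false
      rw [show List.splitOnP (fun x => x == '\\') s.toList = s.toList.splitOn '\\' from rfl,
          hs] at hj
      rw [pvB_loop rest 1 p0,
          show (PySem.Int.mod 1 2 == 1) = true from by decide]
      simp only [Bool.not_false] at hj
      rw [hj]
  rw [hB]
  unfold deleting_slash
  by_cases h : '\\' ∈ PySem.Set.ofList s.toList
  · simp only [h, if_pos]
    show String.ofList (s.toList.foldl
      (fun (st : Int × List Char) c =>
        if c.toNat == 92 then
          let k := st.1 + 1
          if k == 2 then (0, st.2) else (k, st.2 ++ [c])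
        else (st.1, st.2 ++ [c])) (0, [])).2 = _
    have ha := pvA_loop s.toList false []
    rw [show (if false then (1 : Int) else 0) = 0 from rfl] at ha
    rw [ha, List.nil_append]
  · have hnm : '\\' ∉ s.toList := fun hm => h ((PySem.Set.mem_ofList _ _).mpr hm)
    simp only [h, if_neg, not_false_iff]
    rw [pvF_no_back s.toList hnm, String.ofList_toList]
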